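-- pv_equiv track=rewrite | github.com/prbsth/algorithms | karmarkar-karp.py | karmarkar_karp
-- ===== SOURCE A (Python) =====
-- import heapq
--
-- def karmarkar_karp(a):
--     h = [-i for i in a]
--     heapq.heapify(h)
--
--     while len(h) > 1:
--         first = -heapq.heappop(h)
--         second = -heapq.heappop(h)
--         if first != second:  #for efficiency, pushing 0 makes no difference
--             heapq.heappush(h, -(first - second))
--
--     return -h[0] if h else 0
-- ===== SOURCE B (Python) =====
-- def karmarkar_karp(a):
--     # descending insertion-sorted list; pair off the two largest each round
--     vals = []
--     for x in a:
--         i = 0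
--         while i < len(vals) and vals[i] > x:
--             i += 1
--         vals.insert(i, x)
--     while len(vals) > 1:
--         d = vals[0] - vals[1]
--         vals = vals[2:]
--         if d:
--             i = 0
--             while i < len(vals) and vals[i] > d:
--                 i += 1
--             vals.insert(i, d)
--     return vals[0] if vals else 0
-- ===== Notes on version B (the rewrite author's own statement) =====
-- stated objective: alternative
-- what changed: Replaces the binary heap of negated values by a descending insertion-sorted list: the two largest are simply the first two elements each round, and the nonzero difference is re-inserted at its sorted position.
import Mathlib
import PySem

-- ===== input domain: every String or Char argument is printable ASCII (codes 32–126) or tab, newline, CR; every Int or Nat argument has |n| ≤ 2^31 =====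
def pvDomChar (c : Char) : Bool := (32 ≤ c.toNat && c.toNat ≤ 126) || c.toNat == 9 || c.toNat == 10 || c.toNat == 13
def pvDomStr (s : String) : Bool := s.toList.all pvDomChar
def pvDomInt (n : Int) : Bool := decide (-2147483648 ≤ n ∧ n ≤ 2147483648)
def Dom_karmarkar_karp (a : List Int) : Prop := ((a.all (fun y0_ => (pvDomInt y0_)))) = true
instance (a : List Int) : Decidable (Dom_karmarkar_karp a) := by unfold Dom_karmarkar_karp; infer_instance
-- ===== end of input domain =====

-- B replaces A's binary heap of negated values by a descending insertion-sorted list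
-- whose two front elements are the two largest (objective: alternative, same result).

-- ===== PORT A =====
-- Python's heapq is ported value-level: heappop yields the minimum element of the heap
-- and removes one occurrence of it, heappush adds the element; only the popped values
-- and the final sole element are observable, so this is exact on the returned value.
theorem pv_min?_some (l : List Int) (hl : l ≠ []) : ∃ m, l.min? = some m := by
  cases hh : l.min? with
  | none => exact absurd (List.min?_eq_none_iff.mp hh) hl
  | some v => exact ⟨v, rfl⟩

theorem pv_erase_min_length (h : List Int) (hl : h ≠ []) :
    (h.erase (h.min?.getD 0)).length = h.length - 1 := by
  obtain ⟨m, hm⟩ := pv_min?_some h hl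
  have hmem : m ∈ h := (List.min?_eq_some_iff.mp hm).1
  rw [hm]
  simpa using List.length_erase_of_mem hmem

def kkLoopA (h : List Int) : List Int :=
  if hl : h.length > 1 then
    let m1 := h.min?.getD 0
    let h1 := h.erase m1
    let m2 := h1.min?.getD 0
    let h2 := h1.erase m2
    let first := -m1
    let second := -m2
    kkLoopA (if first ≠ second then h2 ++ [-(first - second)] else h2)
  else h
termination_by h.length
decreasing_by
  have hne : h ≠ [] := by intro he; subst he; simp at hl
  have e1 := pv_erase_min_length h hne
  have hne2 : h.erase (h.min?.getD 0) ≠ [] := by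
    intro he
    rw [he] at e1
    simp only [List.length_nil] at e1
    omega
  have e2 := pv_erase_min_length _ hne2
  split_ifs <;> (try simp only [List.length_append, List.length_cons, List.length_nil]) <;> omega

def karmarkar_karp (a : List Int) : Int :=
  let h := a.map (fun i => -i)
  match kkLoopA h with
  | [] => 0
  | v :: _ => -v

-- ===== PORT B =====
-- insert d into a descending-sorted list (before the first element not greater than d)
def insertDesc (d : Int) : List Int → List Int
  | [] => [d]
  | x :: xs => if x > d then x :: insertDesc d xs else d :: x :: xs

theorem length_insertDesc (d : Int) (l : List Int) :
    (insertDesc d l).length = l.length + 1 := by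
  induction l with
  | nil => simp [insertDesc]
  | cons x xs ih => simp only [insertDesc]; split_ifs <;> simp [ih]

def kkLoopB (l : List Int) : List Int :=
  match l with
  | x :: y :: rest =>
    let d := x - y
    kkLoopB (if d ≠ 0 then insertDesc d rest else rest)
  | l => l
termination_by l.length
decreasing_by split_ifs <;> simp [length_insertDesc]

def karmarkar_karp_alt (a : List Int) : Int :=
  let vals := a.foldl (fun acc x => insertDesc x acc) []
  match kkLoopB vals with
  | [] => 0
  | v :: _ => v

-- ===== PRECONDITION & SPEC =====
def Spec_karmarkar_karp (a : List Int) (out : Int) : Prop := out = karmarkar_karp_alt a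
instance (a : List Int) (out : Int) : Decidable (Spec_karmarkar_karp a out) := by unfold Spec_karmarkar_karp; infer_instance

-- ===== CLAIM (what is proved, stated in full; the proofs are below) =====
def Claim_equal_karmarkar_karp : Prop := ∀ (a : List Int), Dom_karmarkar_karp a → Spec_karmarkar_karp a (karmarkar_karp a)

-- ===== LEMMAS AND PROOFS =====

theorem insertDesc_perm (d : Int) (l : List Int) : (insertDesc d l).Perm (d :: l) := by
  induction l with
  | nil => simp [insertDesc]
  | cons x xs ih =>
    simp only [insertDesc]
    split_ifs with hx
    · exact (ih.cons x).trans (List.Perm.swap d x xs)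
    · exact List.Perm.refl _

theorem insertDesc_sorted (d : Int) (l : List Int) (h : l.Pairwise (· ≥ ·)) :
    (insertDesc d l).Pairwise (· ≥ ·) := by
  induction l with
  | nil => simp [insertDesc]
  | cons x xs ih =>
    rw [List.pairwise_cons] at h
    simp only [insertDesc]
    split_ifs with hx
    · refine List.pairwise_cons.mpr ⟨?_, ih h.2⟩
      intro z hz
      rcases List.mem_cons.mp ((insertDesc_perm d xs).mem_iff.mp hz) with rfl | h1
      · omega
      · exact h.1 z h1
    · refine List.pairwise_cons.mpr ⟨?_, List.pairwise_cons.mpr h⟩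
      intro z hz
      rcases List.mem_cons.mp hz with rfl | h1
      · omega
      · have := h.1 z h1; omega

-- in every round A's multiset stays the elementwise negation of B's sorted list
theorem kk_key : ∀ (n : Nat) (lA lB : List Int), lA.length ≤ n →
    lA.Perm (lB.map (fun x => -x)) → lB.Pairwise (· ≥ ·) →
    (match kkLoopA lA with | [] => (0 : Int) | v :: _ => -v)
      = (match kkLoopB lB with | [] => (0 : Int) | v :: _ => v) := by
  intro n
  induction n with
  | zero =>
    intro lA lB hlen hperm _
    have hA : lA = [] := List.length_eq_zero_iff.mp (by omega)
    subst hA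
    have hB : lB = [] := by simpa using hperm.symm.eq_nil
    subst hB
    simp [kkLoopA, kkLoopB]
  | succ n ih =>
    intro lA lB hlen hperm hsorted
    match lB with
    | [] =>
      have hA : lA = [] := List.Perm.eq_nil (by simpa using hperm)
      subst hA; simp [kkLoopA, kkLoopB]
    | [w] =>
      have hA : lA = [-w] := List.perm_singleton.mp (by simpa using hperm)
      subst hA
      simp [kkLoopA, kkLoopB]
    | x :: y :: rest =>
      have hlenA : lA.length = rest.length + 2 := by
        have := hperm.length_eq; simpa using this
      have hx : ∀ w ∈ (x :: y :: rest), w ≤ x := by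
        intro w hw
        rcases List.mem_cons.mp hw with rfl | hw'
        · exact le_refl w
        · exact (List.pairwise_cons.mp hsorted).1 w hw'
      have hsorted' : (y :: rest).Pairwise (· ≥ ·) := (List.pairwise_cons.mp hsorted).2
      have hy : ∀ w ∈ (y :: rest), w ≤ y := by
        intro w hw
        rcases List.mem_cons.mp hw with rfl | hw'
        · exact le_refl w
        · exact (List.pairwise_cons.mp hsorted').1 w hw'
      have hmin1 : lA.min? = some (-x) := by
        refine List.min?_eq_some_iff.mpr ⟨hperm.mem_iff.mpr (by simp), ?_⟩
        intro z hz
        obtain ⟨w, hw, rfl⟩ := List.mem_map.mp (hperm.mem_iff.mp hz)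
        have := hx w hw; omega
      have hperm1 : (lA.erase (-x)).Perm ((y :: rest).map (fun x => -x)) := by
        have := hperm.erase (-x)
        simpa [List.erase_cons_head] using this
      have hmin2 : (lA.erase (-x)).min? = some (-y) := by
        refine List.min?_eq_some_iff.mpr ⟨hperm1.mem_iff.mpr (by simp), ?_⟩
        intro z hz
        obtain ⟨w, hw, rfl⟩ := List.mem_map.mp (hperm1.mem_iff.mp hz)
        have := hy w hw; omega
      have hperm2 : ((lA.erase (-x)).erase (-y)).Perm (rest.map (fun x => -x)) := by
        have := hperm1.erase (-y)
        simpa [List.erase_cons_head] using this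
      have hlen2 : ((lA.erase (-x)).erase (-y)).length = rest.length := by
        have := hperm2.length_eq; simpa using this
      rw [kkLoopA]
      rw [dif_pos (by omega)]
      simp only [hmin1, hmin2, Option.getD_some, neg_neg]
      rw [kkLoopB]
      by_cases hxy : x = y
      · subst hxy
        rw [if_neg (by simp), if_neg (by simp)]
        exact ih _ rest (by omega) hperm2 (List.pairwise_cons.mp hsorted').2
      · have hd : x - y ≠ 0 := sub_ne_zero.mpr hxy
        rw [if_pos hxy, if_pos hd]
        apply ih _ (insertDesc (x - y) rest)
        · rw [List.length_append, hlen2]; simp; omega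
        · refine ((List.perm_append_singleton _ _).trans (hperm2.cons _)).trans ?_
          refine List.Perm.trans ?_ ((insertDesc_perm (x - y) rest).map (fun x => -x)).symm
          simp
        · exact insertDesc_sorted _ _ (List.pairwise_cons.mp hsorted').2

theorem sortB_props : ∀ (a acc : List Int), acc.Pairwise (· ≥ ·) →
    (a.foldl (fun acc x => insertDesc x acc) acc).Pairwise (· ≥ ·) ∧
    (a.foldl (fun acc x => insertDesc x acc) acc).Perm (a ++ acc) := by
  intro a
  induction a with
  | nil => intro acc h; simpa using h
  | cons x xs ih =>
    intro acc h
    obtain ⟨hs, hp⟩ := ih (insertDesc x acc) (insertDesc_sorted x acc h)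
    refine ⟨hs, ?_⟩
    refine hp.trans ?_
    refine (List.Perm.append_left xs (insertDesc_perm x acc)).trans ?_
    simpa using List.perm_middle

-- ===== VERDICT (by name: the statement is the Claim_ definition above) =====
theorem karmarkar_karp_spec : Claim_equal_karmarkar_karp := by
  intro a _
  unfold Spec_karmarkar_karp karmarkar_karp karmarkar_karp_alt
  obtain ⟨hs, hp⟩ := sortB_props a [] (by simp)
  rw [List.append_nil] at hp
  exact kk_key (a.map (fun i => -i)).length _ _ (le_refl _) ((hp.map (fun x => -x)).symm) hs
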